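-- pv_equiv track=rewrite | github.com/aviAVIRAL/MY_WORK | DSA/4 array/Matrix 2D arr/1 Delloit  .py | f
-- ===== SOURCE A (Python) =====
-- def f(matrix, n, m):
--     mp = {}
--     for i in range(n):  # Iterate over the rows
--         for j in range(m):  # Iterate over the columns
--             if matrix[i][j] not in mp:
--                 mp[matrix[i][j]] = 1
--             else:
--                 mp[matrix[i][j]] += 1
--
--     ans = 0
--     for key, value in mp.items():
--         if value % 2 == 0:
--             ans += value * key
--
--     return ans
-- ===== SOURCE B (Python) =====
-- def f(matrix, n, m):
--     vals = []
--     for i in range(n):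
--         for j in range(m):
--             vals.append(matrix[i][j])
--     vals.sort()
--     ans = 0
--     k = 0
--     L = len(vals)
--     while k < L:
--         j = k + 1
--         while j < L and vals[j] == vals[k]:
--             j += 1
--         cnt = j - k
--         if cnt % 2 == 0:
--             ans += vals[k] * cnt
--         k = j
--     return ans
-- ===== Notes on version B (the rewrite author's own statement) =====
-- stated objective: alternative
-- what changed: Replaces the hash-map counting pass plus dict-items sweep with flatten, sort, and a single scan grouping equal adjacent values into runs, adding value*length for even-length runs.
import Mathlib
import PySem

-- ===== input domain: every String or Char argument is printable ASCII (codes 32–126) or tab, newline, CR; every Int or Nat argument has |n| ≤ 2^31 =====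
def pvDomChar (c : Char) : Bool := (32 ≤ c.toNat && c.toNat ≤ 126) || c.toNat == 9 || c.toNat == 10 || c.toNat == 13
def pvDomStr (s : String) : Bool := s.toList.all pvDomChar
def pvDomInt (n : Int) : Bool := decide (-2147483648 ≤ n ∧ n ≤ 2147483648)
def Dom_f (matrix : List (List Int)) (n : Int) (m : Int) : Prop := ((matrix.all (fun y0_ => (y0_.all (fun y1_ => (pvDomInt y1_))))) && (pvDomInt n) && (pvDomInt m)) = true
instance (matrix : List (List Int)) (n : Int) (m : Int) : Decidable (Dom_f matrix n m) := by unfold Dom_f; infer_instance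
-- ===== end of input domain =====

-- B sorts the flattened entries and scans runs of equal values instead of A's dict counting; same result, alternative algorithm.

-- ===== PORT A =====
-- matrix[i][j]; an out-of-range index is Python's IndexError (pyGet? = none), excluded by Pre_f
def pvCell (matrix : List (List Int)) (i : Int) (j : Int) : Int :=
  (PySem.List.pyGet? ((PySem.List.pyGet? matrix i).getD []) j).getD 0

def f (matrix : List (List Int)) (n : Int) (m : Int) : Int :=
  ((PySem.List.pyRange 0 n 1).foldl (fun mp i =>
      (PySem.List.pyRange 0 m 1).foldl (fun mp j =>
        if mp.contains (pvCell matrix i j) = false then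
          mp.insert (pvCell matrix i j) 1
        else
          mp.insert (pvCell matrix i j) (mp.getD (pvCell matrix i j) 0 + 1)) mp)
      PySem.Dict.empty).items.foldl
    (fun ans kv => if PySem.Int.mod kv.2 2 = 0 then ans + kv.2 * kv.1 else ans) 0

-- ===== PORT B =====
-- the flatten loops of Source B ('vals.append(matrix[i][j])')
def pvVals (matrix : List (List Int)) (n : Int) (m : Int) : List Int :=
  (PySem.List.pyRange 0 n 1).foldl (fun acc i =>
    (PySem.List.pyRange 0 m 1).foldl (fun acc j => acc ++ [pvCell matrix i j]) acc) []

-- Source B's outer while: at position k, advance j through the run of values equal to vals[k],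
-- add vals[k]*cnt when cnt is even, continue at j (= drop the run)
def pvRuns : List Int → Int
  | [] => 0
  | x :: rest =>
    let cnt : Int := 1 + (rest.takeWhile (fun y => y == x)).length
    (if PySem.Int.mod cnt 2 = 0 then x * cnt else 0) + pvRuns (rest.dropWhile (fun y => y == x))
termination_by s => s.length
decreasing_by
  simpa [Nat.lt_succ_iff] using List.length_dropWhile_le (fun y => y == x) rest

def f_alt (matrix : List (List Int)) (n : Int) (m : Int) : Int :=
  pvRuns (PySem.List.sorted (pvVals matrix n m) (fun x => x) false)

-- ===== PRECONDITION & SPEC =====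
-- Pre_f: exactly the inputs where A raises no IndexError: when the inner loop runs (0 < m),
-- every visited row index and column index must be in range.
def Pre_f (matrix : List (List Int)) (n : Int) (m : Int) : Prop :=
  0 < m → (n.toNat ≤ matrix.length ∧ ∀ row ∈ matrix.take n.toNat, m.toNat ≤ row.length)
instance (matrix : List (List Int)) (n : Int) (m : Int) : Decidable (Pre_f matrix n m) := by
  unfold Pre_f; infer_instance

def pvWitness_f : List (List Int) × Int × Int := ([[1, 2], [1, 3]], 2, 2)

def Spec_f (matrix : List (List Int)) (n : Int) (m : Int) (out : Int) : Prop := out = f_alt matrix n m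
instance (matrix : List (List Int)) (n : Int) (m : Int) (out : Int) : Decidable (Spec_f matrix n m out) := by unfold Spec_f; infer_instance

-- ===== CLAIM (what is proved, stated in full; the proofs are below) =====
def Claim_equal_f : Prop := ∀ (matrix : List (List Int)) (n : Int) (m : Int), Dom_f matrix n m → Pre_f matrix n m → Spec_f matrix n m (f matrix n m)

-- ===== LEMMAS AND PROOFS =====

-- the even-count contribution of key k in list L (value*count for even counts, else 0)
def pvH (L : List Int) (k : Int) : Int :=
  if PySem.Int.mod (L.count k : Int) 2 = 0 then (L.count k : Int) * k else 0

theorem pv_vals_flatMap (matrix : List (List Int)) (n m : Int) :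
    pvVals matrix n m =
      (PySem.List.pyRange 0 n 1).flatMap (fun i =>
        (PySem.List.pyRange 0 m 1).map (fun j => pvCell matrix i j)) := by
  unfold pvVals
  have h1 := PySem.List.foldl_congr_mem (PySem.List.pyRange 0 n 1)
    (fun acc i => (PySem.List.pyRange 0 m 1).foldl (fun acc j => acc ++ [pvCell matrix i j]) acc)
    (fun acc i => acc ++ (PySem.List.pyRange 0 m 1).map (fun j => pvCell matrix i j))
    ([] : List Int)
    (by intro acc i _
        show (PySem.List.pyRange 0 m 1).foldl (fun a j => a ++ [pvCell matrix i j]) acc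
            = acc ++ (PySem.List.pyRange 0 m 1).map (fun j => pvCell matrix i j)
        rw [PySem.List.foldl_append_singleton_eq_map])
  rw [h1, PySem.List.foldl_append_eq_flatMap]
  simp

theorem pv_dict_eq_counter (matrix : List (List Int)) (n m : Int) :
    ((PySem.List.pyRange 0 n 1).foldl (fun mp i =>
      (PySem.List.pyRange 0 m 1).foldl (fun mp j =>
        if mp.contains (pvCell matrix i j) = false then
          mp.insert (pvCell matrix i j) 1
        else
          mp.insert (pvCell matrix i j) (mp.getD (pvCell matrix i j) 0 + 1)) mp)
      PySem.Dict.empty) = PySem.Dict.counter (pvVals matrix n m) := by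
  have hstep : ∀ (mp : PySem.Dict Int Int) (v : Int),
      (if mp.contains v = false then mp.insert v 1 else mp.insert v (mp.getD v 0 + 1))
        = mp.insert v (mp.getD v 0 + 1) := by
    intro mp v
    by_cases h : mp.contains v = false
    · simp [h, PySem.Dict.getD_of_not_contains mp 0 h]
    · simp [h]
  rw [pv_vals_flatMap]
  rw [← PySem.Dict.foldl_insert_getD_add_one_eq_counter]
  rw [List.flatMap, List.foldl_flatten, List.foldl_map]
  apply PySem.List.foldl_congr_mem
  intro d i _
  rw [List.foldl_map]
  exact PySem.List.foldl_congr_mem _ _ _ _ (by intro acc j _; exact hstep acc _)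

theorem pv_A_eq_sum (matrix : List (List Int)) (n m : Int) :
    f matrix n m = (pvVals matrix n m).toFinset.sum (pvH (pvVals matrix n m)) := by
  unfold f
  rw [pv_dict_eq_counter]
  set L := pvVals matrix n m with hL
  rw [PySem.Dict.items_counter, List.foldl_map]
  have h1 := PySem.List.foldl_congr_mem (PySem.Set.ofList L)
    (fun ans k => if PySem.Int.mod (L.count k : Int) 2 = 0 then ans + (L.count k : Int) * k else ans)
    (fun ans k => ans + pvH L k)
    (0 : Int)
    (by intro ans k _
        show (if PySem.Int.mod ((L.count k : Int)) 2 = 0 then ans + (L.count k : Int) * k else ans)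
            = ans + pvH L k
        unfold pvH; split_ifs <;> ring)
  rw [h1, PySem.List.foldl_add]
  rw [← List.sum_toFinset _ (PySem.Set.nodup_ofList L)]
  have h2 : (PySem.Set.ofList L).toFinset = L.toFinset := by
    apply Finset.ext; intro a
    simp [List.mem_toFinset, PySem.Set.mem_ofList]
  rw [h2]; ring

theorem pv_runs_eq_sum (s : List Int) (hs : s.Pairwise (· ≤ ·)) :
    pvRuns s = s.toFinset.sum (pvH s) := by
  induction hn : s.length using Nat.strong_induction_on generalizing s with
  | _ N ih =>
  cases s with
  | nil => simp [pvRuns]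
  | cons x rest =>
    rw [pvRuns]
    set t := rest.takeWhile (fun y => y == x) with ht
    set d := rest.dropWhile (fun y => y == x) with hd
    have hrest : rest = t ++ d := (List.takeWhile_append_dropWhile).symm
    have htx : ∀ y ∈ t, y = x := by
      intro y hy
      have := List.mem_takeWhile_imp hy
      simpa using this
    have hpr : rest.Pairwise (· ≤ ·) := (List.pairwise_cons.mp hs).2
    have hxle : ∀ y ∈ rest, x ≤ y := (List.pairwise_cons.mp hs).1
    have hdsub : d.Sublist rest := List.dropWhile_sublist _
    have hpd : d.Pairwise (· ≤ ·) := hpr.sublist hdsub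
    have hxd : x ∉ d := by
      intro hxmem
      cases hdd : d with
      | nil => simp [hdd] at hxmem
      | cons z tl =>
        have hz : ¬ (z == x) = true := by
          have := List.head?_dropWhile_not (fun y => y == x) rest
          rw [← hd, hdd] at this; simpa using this
        have hzx : z ≠ x := by simpa using hz
        have hxlez : x ≤ z := hxle z (hdsub.mem (by simp [hdd]))
        have hzlt : x < z := lt_of_le_of_ne hxlez (Ne.symm hzx)
        rw [hdd] at hxmem
        rcases List.mem_cons.mp hxmem with h | h
        · exact hzx h.symm
        · have : z ≤ x := ((List.pairwise_cons.mp (hdd ▸ hpd)).1) x h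
          exact absurd (lt_of_lt_of_le hzlt this) (lt_irrefl x)
    have hcountt : t.count x = t.length := by
      rw [List.count_eq_length]; intro y hy; exact ((htx y hy) ▸ rfl)
    have hcounts : (x :: rest).count x = 1 + t.length := by
      rw [hrest]
      simp [List.count_append, hcountt, List.count_eq_zero.mpr hxd]
      omega
    have htoF : (x :: rest).toFinset = insert x d.toFinset := by
      apply Finset.ext; intro a
      simp only [hrest, List.toFinset_cons, List.toFinset_append, Finset.mem_insert,
        Finset.mem_union, List.mem_toFinset]
      constructor
      · rintro (h | h | h)
        · exact Or.inl h
        · exact Or.inl (htx a h)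
        · exact Or.inr (by simpa using h)
      · rintro (h | h)
        · exact Or.inl h
        · exact Or.inr (Or.inr (by simpa using h))
    have hcount_ne : ∀ k, k ≠ x → (x :: rest).count k = d.count k := by
      intro k hk
      rw [hrest]
      have h0 : List.count k t = 0 := List.count_eq_zero.mpr (fun hmem => hk (htx k hmem))
      simp [List.count_cons, List.count_append, h0]
      try exact fun h => hk h.symm
    have hxnotF : x ∉ d.toFinset := by simpa using hxd
    have hdlen : d.length < N := by
      have h1 : d.length ≤ rest.length := hdsub.length_le
      have : rest.length + 1 = N := by simpa using hn
      omega
    have hIH : pvRuns d = d.toFinset.sum (pvH d) := ih d.length hdlen d hpd rfl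
    rw [htoF, Finset.sum_insert hxnotF]
    have hHx : pvH (x :: rest) x
        = (if PySem.Int.mod (1 + ((rest.takeWhile (fun y => y == x)).length : Int)) 2 = 0
            then x * (1 + ((rest.takeWhile (fun y => y == x)).length : Int)) else 0) := by
      unfold pvH
      rw [hcounts, ← ht]
      push_cast
      split_ifs <;> ring
    have hsum : d.toFinset.sum (pvH (x :: rest)) = d.toFinset.sum (pvH d) := by
      apply Finset.sum_congr rfl
      intro k hk
      have hkx : k ≠ x := by
        intro h; exact hxnotF (h ▸ hk)
      unfold pvH; rw [hcount_ne k hkx]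
    rw [hHx, hsum, hIH]

-- ===== VERDICT (by name: the statement is the Claim_ definition above) =====
theorem f_spec : Claim_equal_f := by
  intro matrix n m _ _
  unfold Spec_f
  set L := pvVals matrix n m with hL
  set s := PySem.List.sorted L (fun x => x) false with hsdef
  have hperm : s.Perm L := PySem.List.sorted_perm L (fun x => x) false
  have hsorted : s.Pairwise (· ≤ ·) := by
    have := PySem.List.sorted_pairwise L (fun x => x)
    simpa using this
  have hB : f_alt matrix n m = s.toFinset.sum (pvH s) := by
    unfold f_alt
    rw [← hL, ← hsdef]
    exact pv_runs_eq_sum s hsorted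
  have hFin : s.toFinset = L.toFinset := by
    apply Finset.ext; intro a
    simp [List.mem_toFinset, hperm.mem_iff]
  have hHsame : ∀ k, pvH s k = pvH L k := by
    intro k; unfold pvH; rw [hperm.count_eq]
  rw [pv_A_eq_sum, hB, hFin]
  exact (Finset.sum_congr rfl (fun k _ => hHsame k)).symm
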